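-- pv_equiv track=rewrite | github.com/jonathanwmaddison/healthcare-data-poc | services/integration-engine/app/main.py | _matches_pattern
-- ===== SOURCE A (Python) =====
-- def _matches_pattern(routing_key: str, pattern: str) -> bool:
--     """Check if routing key matches pattern (supports * wildcard)"""
--     key_parts = routing_key.split(".")
--     pattern_parts = pattern.split(".")
--
--     if len(key_parts) != len(pattern_parts):
--         return False
--
--     for kp, pp in zip(key_parts, pattern_parts):
--         if pp != "*" and kp != pp:
--             return False
--
--     return True
-- ===== SOURCE B (Python) =====
-- def _matches_pattern(routing_key: str, pattern: str) -> bool: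
--     """Segment-streaming rewrite: walk both strings segment by segment using
--     str.find, never materialising the split lists."""
--     k, p = routing_key, pattern
--     if p == "*":
--         return "." not in k
--     if p.startswith("*."):
--         i = k.find(".")
--         return i >= 0 and _matches_pattern(k[i + 1:], p[2:])
--     i, j = k.find("."), p.find(".")
--     if i < 0 or j < 0:
--         return i < 0 and j < 0 and k == p
--     return k[:i] == p[:j] and _matches_pattern(k[i + 1:], p[j + 1:])
-- ===== Notes on version B (the rewrite author's own statement) =====
-- stated objective: alternative
-- what changed: Replaces split-into-lists + length check + zip loop by a recursive segment-by-segment walk over the two strings using str.find, never building the split lists (the fixed consumption of one '.' per step enforces equal segment counts implicitly).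
import Mathlib
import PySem

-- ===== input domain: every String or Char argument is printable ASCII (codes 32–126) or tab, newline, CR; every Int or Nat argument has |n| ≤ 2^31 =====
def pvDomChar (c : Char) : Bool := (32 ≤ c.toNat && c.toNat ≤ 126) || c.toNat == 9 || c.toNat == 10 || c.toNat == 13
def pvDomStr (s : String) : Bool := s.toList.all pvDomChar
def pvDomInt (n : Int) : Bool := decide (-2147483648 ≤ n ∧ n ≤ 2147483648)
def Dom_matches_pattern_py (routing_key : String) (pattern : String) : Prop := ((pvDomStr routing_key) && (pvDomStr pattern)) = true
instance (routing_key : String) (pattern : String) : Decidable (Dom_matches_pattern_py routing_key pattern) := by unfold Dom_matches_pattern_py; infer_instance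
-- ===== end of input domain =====

-- B replaces A's split-into-lists + length check + zip loop by a recursive segment-by-segment
-- walk over the two strings using str.find (objective: alternative decomposition, same cost).

-- ===== PORT A =====
-- routing_key.split(".") / pattern.split(".") → PySem.Chars.splitOn on the char lists ("." ≠ "");
-- the early-return loop over zip(key_parts, pattern_parts) → List.all over the zip.
def matches_pattern_py (routing_key : String) (pattern : String) : Bool :=
  let key_parts := PySem.Chars.splitOn routing_key.toList ['.']
  let pattern_parts := PySem.Chars.splitOn pattern.toList ['.']
  if key_parts.length != pattern_parts.length then false
  else (key_parts.zip pattern_parts).all (fun kp_pp => kp_pp.2 == ['*'] || kp_pp.1 == kp_pp.2)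

-- ===== PORT B =====
-- literal transliteration of Source B's recursive walk; k.find(".") → PySem.Chars.find,
-- k[i+1:], p[2:], k[:i] → PySem.List.slice on the char lists.
def pvWalk (k : List Char) (p : List Char) : Bool :=
  if p = ['*'] then !(PySem.Chars.isIn ['.'] k)
  else if PySem.Chars.startswith p ['*', '.'] then
    let i := PySem.Chars.find k ['.']
    if h0i : 0 ≤ i then
      pvWalk (PySem.List.slice k (some (i + 1)) none) (PySem.List.slice p (some 2) none)
    else false
  else
    let i := PySem.Chars.find k ['.']
    let j := PySem.Chars.find p ['.']
    if hij : i < 0 ∨ j < 0 then decide (i < 0) && decide (j < 0) && (k == p)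
    else
      (PySem.List.slice k none (some i) == PySem.List.slice p none (some j)) &&
        pvWalk (PySem.List.slice k (some (i + 1)) none) (PySem.List.slice p (some (j + 1)) none)
termination_by p.length
decreasing_by
  · rename_i hstar hpre
    have hpfx : ['*', '.'] <+: p := (PySem.Chars.startswith_iff p ['*', '.']).mp hpre
    have hlen : 2 ≤ p.length := by simpa using hpfx.length_le
    rw [PySem.List.slice_from p (show (0:Int) ≤ 2 by norm_num)]
    simp only [List.length_drop]
    omega
  · rename_i hstar hpre
    have hj : (0 : Int) ≤ PySem.Chars.find p ['.'] := by omega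
    have hinf : ['.'] <:+: p := (PySem.Chars.find_nonneg_iff p ['.']).mp hj
    have hne : p ≠ [] := by
      rintro rfl
      exact absurd ((List.singleton_infix_iff _ _).mp hinf) (by simp)
    rw [PySem.List.slice_from p (show (0:Int) ≤ PySem.Chars.find p ['.'] + 1 by omega)]
    simp only [List.length_drop]
    have h1 : 0 < p.length := List.length_pos_iff.mpr hne
    omega

def matches_pattern_py_alt (routing_key : String) (pattern : String) : Bool :=
  pvWalk routing_key.toList pattern.toList

-- ===== PRECONDITION & SPEC =====
def Spec_matches_pattern_py (routing_key : String) (pattern : String) (out : Bool) : Prop := out = matches_pattern_py_alt routing_key pattern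
instance (routing_key : String) (pattern : String) (out : Bool) : Decidable (Spec_matches_pattern_py routing_key pattern out) := by unfold Spec_matches_pattern_py; infer_instance

-- ===== CLAIM (what is proved, stated in full; the proofs are below) =====
def Claim_equal_matches_pattern_py : Prop := ∀ (routing_key : String) (pattern : String), Dom_matches_pattern_py routing_key pattern → Spec_matches_pattern_py routing_key pattern (matches_pattern_py routing_key pattern)

-- ===== LEMMAS AND PROOFS =====

def pvSegs : List Char → List (List Char)
  | [] => [[]]
  | c :: rest =>
    if c = '.' then [] :: pvSegs rest
    else
      match pvSegs rest with
      | [] => [[c]]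
      | s :: ss => (c :: s) :: ss

theorem pvSegs_ne_nil (l : List Char) : pvSegs l ≠ [] := by
  cases l with
  | nil => simp [pvSegs]
  | cons c rest =>
    simp only [pvSegs]
    split
    · simp
    · split <;> simp

theorem pvSegs_no_dot (l : List Char) (h : '.' ∉ l) : pvSegs l = [l] := by
  induction l with
  | nil => rfl
  | cons c rest ih =>
    simp only [List.mem_cons, not_or] at h
    simp only [pvSegs]
    rw [if_neg (fun hc => h.1 hc.symm), ih h.2]

theorem pvGo_eq (fuel : Nat) : ∀ (l cur : List Char) (acc : List (List Char)), l.length < fuel →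
    PySem.Chars.splitOn.go ['.'] fuel l cur acc =
      acc.reverse ++ (pvSegs l).modifyHead (cur.reverse ++ ·) := by
  induction fuel with
  | zero => intro l cur acc h; omega
  | succ n ih =>
    intro l cur acc h
    cases l with
    | nil => simp [PySem.Chars.splitOn.go, pvSegs]
    | cons c rest =>
      rw [PySem.Chars.splitOn.go]
      by_cases hc : c = '.'
      · subst hc
        rw [if_pos (by simp [List.isPrefixOf])]
        rw [ih _ _ _ (by simpa using Nat.lt_of_succ_lt_succ h)]
        simp only [pvSegs]
        obtain ⟨s, ss, hs⟩ := List.exists_cons_of_ne_nil (pvSegs_ne_nil rest)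
        simp [hs]
      · rw [if_neg (by simp [List.isPrefixOf]; exact fun h' => hc h'.symm)]
        rw [ih _ _ _ (by simpa using Nat.lt_of_succ_lt_succ h)]
        simp only [pvSegs, if_neg hc]
        obtain ⟨s, ss, hs⟩ := List.exists_cons_of_ne_nil (pvSegs_ne_nil rest)
        rw [hs]
        simp

def pvSegMatch : List (List Char) → List (List Char) → Bool
  | [], [] => true
  | kseg :: ks, pseg :: ps => (pseg == ['*'] || kseg == pseg) && pvSegMatch ks ps
  | [], _ :: _ => false
  | _ :: _, [] => false

theorem pvSplitOn_dot (l : List Char) : PySem.Chars.splitOn l ['.'] = pvSegs l := by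
  unfold PySem.Chars.splitOn
  rw [pvGo_eq (l.length + 1) l [] [] (by omega)]
  obtain ⟨s, ss, hs⟩ := List.exists_cons_of_ne_nil (pvSegs_ne_nil l)
  simp [hs]

theorem pvA_eq (ks : List (List Char)) : ∀ (ps : List (List Char)),
    (if ks.length != ps.length then false
     else (ks.zip ps).all (fun kp_pp => kp_pp.2 == ['*'] || kp_pp.1 == kp_pp.2)) = pvSegMatch ks ps := by
  induction ks with
  | nil => intro ps; cases ps <;> simp [pvSegMatch]
  | cons kseg ks ih =>
    intro ps
    cases ps with
    | nil => simp [pvSegMatch]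
    | cons pseg ps =>
      simp only [pvSegMatch, List.zip_cons_cons, List.all_cons, List.length_cons]
      rw [← ih ps]
      by_cases hl : ks.length = ps.length
      · simp [hl]
      · simp [hl, bne_iff_ne]

theorem pvSegs_at (n : Nat) : ∀ (l : List Char), (∀ m, m < n → l[m]? ≠ some '.') → l[n]? = some '.' →
    pvSegs l = l.take n :: pvSegs (l.drop (n + 1)) := by
  induction n with
  | zero =>
    intro l _ h0
    cases l with
    | nil => simp at h0
    | cons c rest =>
      simp at h0
      subst h0
      simp [pvSegs]
  | succ n ih =>
    intro l hlt hn
    cases l with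
    | nil => simp at hn
    | cons c rest =>
      have hc : c ≠ '.' := by
        have := hlt 0 (by omega)
        simpa using this
      simp only [pvSegs, if_neg hc]
      rw [ih rest (fun m hm => by simpa using hlt (m+1) (by omega)) (by simpa using hn)]
      simp
theorem pvSingleton_prefix (a : Char) (l : List Char) : [a] <+: l ↔ l.head? = some a := by
  cases l with
  | nil => simp
  | cons b t => simp [List.cons_prefix_cons, eq_comm]

theorem pvFind_spec (k : List Char) (h : 0 ≤ PySem.Chars.find k ['.']) :
    k[(PySem.Chars.find k ['.']).toNat]? = some '.' ∧
      ∀ m, m < (PySem.Chars.find k ['.']).toNat → k[m]? ≠ some '.' := by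
  have h0 : PySem.Chars.findFrom k ['.'] ((0:Nat):Int) = PySem.Chars.find k ['.'] := by
    simpa using PySem.Chars.findFrom_zero k ['.']
  have hspec := PySem.Chars.findFrom_natCast_spec k ['.'] 0 (by omega) (by rw [h0]; omega)
  rw [h0] at hspec
  obtain ⟨-, hpfx, hmin⟩ := hspec
  constructor
  · have := (pvSingleton_prefix '.' _).mp hpfx
    rwa [List.head?_drop] at this
  · intro m hm hmem
    exact hmin m (by omega) hm ((pvSingleton_prefix '.' _).mpr (by rwa [List.head?_drop]))

theorem pvNoDot_of_neg (k : List Char) (h : PySem.Chars.find k ['.'] < 0) : '.' ∉ k := by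
  intro hd
  have : 0 ≤ PySem.Chars.find k ['.'] :=
    (PySem.Chars.find_nonneg_iff k ['.']).mpr ((List.singleton_infix_iff '.' k).mpr hd)
  omega

theorem pvSegs_of_find (k : List Char) (h : 0 ≤ PySem.Chars.find k ['.']) :
    pvSegs k = k.take (PySem.Chars.find k ['.']).toNat ::
      pvSegs (k.drop ((PySem.Chars.find k ['.']).toNat + 1)) := by
  obtain ⟨h1, h2⟩ := pvFind_spec k h
  exact pvSegs_at _ k h2 h1

theorem pvTake_ne_star (p : List Char) (hstar : p ≠ ['*'])
    (hpre : ¬ PySem.Chars.startswith p ['*', '.'] = true)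
    (hj : 0 ≤ PySem.Chars.find p ['.']) :
    (p.take (PySem.Chars.find p ['.']).toNat == ['*']) = false := by
  obtain ⟨h1, h2⟩ := pvFind_spec p hj
  rw [beq_eq_false_iff_ne]
  intro heq
  have hjlt : (PySem.Chars.find p ['.']).toNat < p.length := (List.getElem?_eq_some_iff.mp h1).1
  have hlen : min (PySem.Chars.find p ['.']).toNat p.length = 1 := by
    have := congrArg List.length heq
    simpa using this
  have hj1 : (PySem.Chars.find p ['.']).toNat = 1 := by omega
  rw [hj1] at h1 heq
  apply hpre
  rw [PySem.Chars.startswith_iff]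
  cases p with
  | nil => simp at hjlt
  | cons a rest =>
    have ha : a = '*' := by
      simpa using congrArg List.head? heq
    cases rest with
    | nil => rw [hj1] at hjlt; simp at hjlt
    | cons b t =>
      have hb : b = '.' := by
        simpa using h1
      exact ⟨t, by simp [ha, hb]⟩

theorem pvWalk_eq (k p : List Char) : pvWalk k p = pvSegMatch (pvSegs k) (pvSegs p) := by
  fun_induction pvWalk k p with
  | case1 k =>
    by_cases hd : '.' ∈ k
    · have hi : 0 ≤ PySem.Chars.find k ['.'] :=
        (PySem.Chars.find_nonneg_iff k ['.']).mpr ((List.singleton_infix_iff '.' k).mpr hd)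
      have hin : PySem.Chars.isIn ['.'] k = true :=
        (PySem.Chars.isIn_iff_infix ['.'] k).mpr ((List.singleton_infix_iff '.' k).mpr hd)
      rw [pvSegs_of_find k hi]
      obtain ⟨s, ss, hs⟩ := List.exists_cons_of_ne_nil
        (pvSegs_ne_nil (k.drop ((PySem.Chars.find k ['.']).toNat + 1)))
      simp [pvSegMatch, hs, hin, pvSegs]
    · have hin : PySem.Chars.isIn ['.'] k = false :=
        (PySem.Chars.isIn_eq_false_iff ['.'] k).mpr
          (fun hinf => hd ((List.singleton_infix_iff '.' k).mp hinf))
      rw [pvSegs_no_dot k hd]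
      simp [pvSegMatch, hin, pvSegs]
  | case2 k p hstar hpre i hi ih =>
    simp only [i] at *
    obtain ⟨t, rfl⟩ := (PySem.Chars.startswith_iff p ['*', '.']).mp hpre
    rw [ih]
    rw [PySem.List.slice_from _ (show (0:Int) ≤ 2 by norm_num),
      PySem.List.slice_from _ (by omega : (0:Int) ≤ PySem.Chars.find k ['.'] + 1)] at *
    have htn : (PySem.Chars.find k ['.'] + 1).toNat = (PySem.Chars.find k ['.']).toNat + 1 := by
      omega
    rw [htn]
    rw [pvSegs_of_find k hi]
    simp [pvSegMatch, pvSegs]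
  | case3 k p hstar hpre i hi =>
    simp only [i] at *
    obtain ⟨t, rfl⟩ := (PySem.Chars.startswith_iff p ['*', '.']).mp hpre
    rw [pvSegs_no_dot k (pvNoDot_of_neg k (by omega))]
    obtain ⟨s, ss, hs⟩ := List.exists_cons_of_ne_nil (pvSegs_ne_nil t)
    simp [pvSegMatch, pvSegs, hs]
  | case4 k p hstar hpre i j hij =>
    simp only [i, j] at *
    have hpstar : (p == ['*']) = false := beq_eq_false_iff_ne.mpr hstar
    rcases lt_or_ge (PySem.Chars.find k ['.']) 0 with hi | hi
    · rcases lt_or_ge (PySem.Chars.find p ['.']) 0 with hj | hj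
      · rw [pvSegs_no_dot k (pvNoDot_of_neg k hi), pvSegs_no_dot p (pvNoDot_of_neg p hj)]
        simp [pvSegMatch, hi, hj, hpstar]
      · rw [pvSegs_no_dot k (pvNoDot_of_neg k hi), pvSegs_of_find p hj]
        obtain ⟨s, ss, hs⟩ := List.exists_cons_of_ne_nil
          (pvSegs_ne_nil (p.drop ((PySem.Chars.find p ['.']).toNat + 1)))
        simp [pvSegMatch, hs, hj]
    · have hj : PySem.Chars.find p ['.'] < 0 := by omega
      rw [pvSegs_of_find k hi, pvSegs_no_dot p (pvNoDot_of_neg p hj)]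
      obtain ⟨s, ss, hs⟩ := List.exists_cons_of_ne_nil
        (pvSegs_ne_nil (k.drop ((PySem.Chars.find k ['.']).toNat + 1)))
      simp [pvSegMatch, hs, hi]
  | case5 k p hstar hpre i j hij ih =>
    simp only [i, j] at *
    have hi : 0 ≤ PySem.Chars.find k ['.'] := by omega
    have hj : 0 ≤ PySem.Chars.find p ['.'] := by omega
    rw [ih]
    rw [PySem.List.slice_from _ (by omega : (0:Int) ≤ PySem.Chars.find k ['.'] + 1),
      PySem.List.slice_from _ (by omega : (0:Int) ≤ PySem.Chars.find p ['.'] + 1),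
      PySem.List.slice_to _ hi, PySem.List.slice_to _ hj]
    have hk : (PySem.Chars.find k ['.'] + 1).toNat = (PySem.Chars.find k ['.']).toNat + 1 := by omega
    have hp : (PySem.Chars.find p ['.'] + 1).toNat = (PySem.Chars.find p ['.']).toNat + 1 := by omega
    rw [hk, hp, pvSegs_of_find k hi, pvSegs_of_find p hj]
    simp [pvSegMatch, pvTake_ne_star p hstar hpre hj]

-- ===== VERDICT (by name: the statement is the Claim_ definition above) =====
theorem matches_pattern_py_spec : Claim_equal_matches_pattern_py := by
  intro rk p _
  show matches_pattern_py rk p = matches_pattern_py_alt rk p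
  unfold matches_pattern_py matches_pattern_py_alt
  rw [pvSplitOn_dot, pvSplitOn_dot, pvWalk_eq]
  exact pvA_eq _ _
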